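-- pv_equiv track=rewrite | github.com/preethamcoder/GSU-Code | CSC4520/article.py | poss
-- ===== SOURCE A (Python) =====
-- def poss(small, large):
--     res = True
--     freqs = {}
--     for each in small:
--         freqs[each] = small.count(each)
--     for each in freqs:
--         if freqs[each] <= large.count(each):
--             res = True
--         else:
--             res = False
--             break
--     return res
-- ===== SOURCE B (Python) =====
-- def poss(small, large):
--     remaining = list(large)
--     for e in small:
--         if e in remaining:
--             remaining.remove(e)
--         else:
--             return False
--     return True
-- ===== Notes on version B (the rewrite author's own statement) =====
-- stated objective: faster
-- what changed: B replaces A's frequency-dictionary build (which calls small.count for every character, making it quadratic) and its compare-counts pass with greedy one-by-one consumption of a shrinking copy of large, returning False at the first element it cannot consume.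
import Mathlib
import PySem

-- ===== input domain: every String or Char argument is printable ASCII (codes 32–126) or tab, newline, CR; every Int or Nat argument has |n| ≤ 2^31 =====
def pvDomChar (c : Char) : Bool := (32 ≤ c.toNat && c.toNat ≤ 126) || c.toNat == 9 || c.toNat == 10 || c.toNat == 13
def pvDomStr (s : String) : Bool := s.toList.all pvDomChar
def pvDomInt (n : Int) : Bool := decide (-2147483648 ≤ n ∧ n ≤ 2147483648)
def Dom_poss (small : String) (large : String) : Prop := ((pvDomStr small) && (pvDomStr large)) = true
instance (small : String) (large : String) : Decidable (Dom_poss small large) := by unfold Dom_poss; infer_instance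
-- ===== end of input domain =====

-- B replaces A's frequency-dictionary-then-compare passes with greedy consumption of a
-- shrinking copy of large (objective: simpler; A does not mutate its arguments, nor does B's return-value behaviour differ).


-- ===== PORT A =====
-- 'for each in freqs: if freqs[each] <= large.count(each): res = True else: res = False; break'
-- res is threaded as the accumulator; 'freqs[each]' is a lookup of a key known to be present
-- (each comes from freqs itself), written (get? c).getD 0.
def possLoopA (freqs : PySem.Dict Char Int) (large : List Char) : List Char → Bool → Bool
  | [], res => res
  | c :: rest, _ =>
    if ((freqs.get? c).getD 0) ≤ ((PySem.Chars.count large [c] : Nat) : Int)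
    then possLoopA freqs large rest true
    else false

def poss (small : String) (large : String) : Bool :=
  -- freqs = {}; for each in small: freqs[each] = small.count(each)
  let freqs : PySem.Dict Char Int := small.toList.foldl
    (fun d c => d.insert c ((PySem.Chars.count small.toList [c] : Nat) : Int)) PySem.Dict.empty
  possLoopA freqs large.toList freqs.keys true

-- ===== PORT B =====
-- remaining = list(large); for e in small: if e in remaining: remaining.remove(e) else: return False
-- 'remaining.remove(e)' on an element known present is List.erase (PySem.List.remove?_eq_some_erase).
def possAltGo (rem : List Char) : List Char → Bool
  | [] => true
  | c :: rest => if rem.contains c then possAltGo (rem.erase c) rest else false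

def poss_alt (small : String) (large : String) : Bool :=
  possAltGo large.toList small.toList

-- ===== PRECONDITION & SPEC =====
def Spec_poss (small : String) (large : String) (out : Bool) : Prop := out = poss_alt small large
instance (small : String) (large : String) (out : Bool) : Decidable (Spec_poss small large out) := by unfold Spec_poss; infer_instance

-- ===== CLAIM (what is proved, stated in full; the proofs are below) =====
def Claim_equal_poss : Prop := ∀ (small : String) (large : String), Dom_poss small large → Spec_poss small large (poss small large)

-- ===== LEMMAS AND PROOFS =====

-- Python's s.count(sub) for a single-character sub is the character count.
theorem chars_count_go_singleton (c : Char) (fuel : Nat) :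
    ∀ (l : List Char) (acc : Nat), l.length ≤ fuel →
    PySem.Chars.count.go [c] fuel l acc = acc + l.count c := by
  induction fuel with
  | zero =>
    intro l acc h
    have : l = [] := List.eq_nil_of_length_eq_zero (Nat.le_zero.mp h)
    subst this; simp [PySem.Chars.count.go]
  | succ n ih =>
    intro l acc h
    cases l with
    | nil => simp [PySem.Chars.count.go]
    | cons x t =>
      rw [PySem.Chars.count.go]
      by_cases hx : x = c
      · subst hx
        have hp : List.isPrefixOf [x] (x :: t) = true := by simp [List.isPrefixOf]
        simp only [hp, if_true, List.length_singleton, List.drop_one, List.tail_cons]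
        rw [ih t (acc + 1) (by simpa using h)]
        simp; omega
      · have hp : List.isPrefixOf [c] (x :: t) = false := by
          simp [List.isPrefixOf]
          intro hb; exact hx hb.symm
        simp only [hp, Bool.false_eq_true, if_false]
        rw [ih t acc (by simpa using h)]
        simp [hx]

theorem chars_count_singleton (cs : List Char) (c : Char) :
    PySem.Chars.count cs [c] = cs.count c := by
  rw [PySem.Chars.count]
  simp [chars_count_go_singleton c cs.length cs 0 le_rfl]

-- lookup in a dict built by inserting value f x for every x of l (value independent of the dict)
theorem getD_foldl_insert_const (f : Char → Int) (l : List Char) :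
    ∀ (d : PySem.Dict Char Int) (c : Char) (d0 : Int),
    (l.foldl (fun d x => d.insert x (f x)) d).getD c d0
      = if c ∈ l then f c else d.getD c d0 := by
  induction l with
  | nil => intro d c d0; simp
  | cons x t ih =>
    intro d c d0
    simp only [List.foldl_cons, ih, PySem.Dict.getD_insert, List.mem_cons]
    by_cases hct : c ∈ t <;> by_cases hcx : c = x <;> simp [hct, hcx]

-- the break-loop of A, started with res = True, is List.all over the keys
theorem possLoopA_eq_all (freqs : PySem.Dict Char Int) (large : List Char) :
    ∀ ks : List Char, possLoopA freqs large ks true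
      = ks.all (fun c => ((freqs.get? c).getD 0) ≤ ((PySem.Chars.count large [c] : Nat) : Int)) := by
  intro ks
  induction ks with
  | nil => rfl
  | cons c rest ih =>
    simp only [possLoopA, List.all_cons]
    by_cases h : ((freqs.get? c).getD 0) ≤ ((PySem.Chars.count large [c] : Nat) : Int) <;>
      simp [h, ih]

-- B's greedy consumption succeeds iff small's multiset fits in the remaining pool
theorem possAltGo_eq_true_iff (ss : List Char) :
    ∀ rem : List Char, possAltGo rem ss = true ↔ ∀ c, ss.count c ≤ rem.count c := by
  induction ss with
  | nil => intro rem; simp [possAltGo]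
  | cons c rest ih =>
    intro rem
    simp only [possAltGo]
    by_cases hc : c ∈ rem
    · have hc1 : 1 ≤ rem.count c := List.one_le_count_iff.mpr hc
      have he : ∀ d : Char, (rem.erase c).count d = rem.count d - (if c == d then 1 else 0) :=
        fun d => List.count_erase
      simp only [List.contains_eq_mem, hc, decide_true, if_true, ih]
      constructor
      · intro h d
        have hd := h d
        rw [he d] at hd
        rw [List.count_cons]
        simp only [beq_iff_eq] at hd ⊢
        by_cases hdc : c = d
        · subst hdc; rw [if_pos rfl] at hd; rw [if_pos rfl]; omega
        · rw [if_neg hdc] at hd; rw [if_neg hdc]; omega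
      · intro h d
        have hd := h d
        rw [List.count_cons] at hd
        rw [he d]
        simp only [beq_iff_eq] at hd ⊢
        by_cases hdc : c = d
        · subst hdc; rw [if_pos rfl] at hd; rw [if_pos rfl]; omega
        · rw [if_neg hdc] at hd; rw [if_neg hdc]; omega
    · simp only [List.contains_eq_mem, hc, decide_false, Bool.false_eq_true, if_false,
        false_iff, not_forall]
      refine ⟨c, ?_⟩
      have : rem.count c = 0 := List.count_eq_zero.mpr hc
      simp [this]

-- A returns True iff every distinct character of small occurs in large at least as often
theorem poss_eq_true_iff (small large : String) :
    poss small large = true ↔ ∀ c ∈ small.toList, small.toList.count c ≤ large.toList.count c := by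
  unfold poss
  rw [possLoopA_eq_all, List.all_eq_true]
  have hkeys : (small.toList.foldl
      (fun d c => d.insert c ((PySem.Chars.count small.toList [c] : Nat) : Int))
      PySem.Dict.empty).keys = PySem.Set.ofList small.toList := by
    rw [PySem.Dict.keys_foldl_insert]
    simp [PySem.Dict.keys_empty, PySem.Set.update_nil_left]
  rw [hkeys]
  constructor
  · intro h c hc
    have hm : c ∈ PySem.Set.ofList small.toList := (PySem.Set.mem_ofList _ _).mpr hc
    have := h c hm
    rw [← PySem.Dict.getD_eq_get?_getD, getD_foldl_insert_const] at this
    simp only [hc, if_true, chars_count_singleton, decide_eq_true_eq] at this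
    exact_mod_cast this
  · intro h c hc
    have hcs : c ∈ small.toList := (PySem.Set.mem_ofList _ _).mp hc
    rw [← PySem.Dict.getD_eq_get?_getD, getD_foldl_insert_const]
    simp only [hcs, if_true, chars_count_singleton, decide_eq_true_eq]
    exact_mod_cast h c hcs

theorem poss_alt_eq_true_iff (small large : String) :
    poss_alt small large = true ↔ ∀ c ∈ small.toList, small.toList.count c ≤ large.toList.count c := by
  unfold poss_alt
  rw [possAltGo_eq_true_iff]
  constructor
  · intro h c _; exact h c
  · intro h c
    by_cases hc : c ∈ small.toList
    · exact h c hc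
    · simp [List.count_eq_zero.mpr hc]

-- ===== VERDICT (by name: the statement is the Claim_ definition above) =====
theorem poss_spec : Claim_equal_poss := by
  intro small large _
  unfold Spec_poss
  rw [Bool.eq_iff_iff, poss_eq_true_iff, poss_alt_eq_true_iff]
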